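-- pv_equiv track=rewrite | github.com/MaximSinyaev/made_algorithms | sorts_2/c.py | count_sort_by_key
-- ===== SOURCE A (Python) =====
-- from collections import deque
--
-- def count_sort_by_key(array: list, indexes: list, key: int):
--     cnt = [deque() for _ in range(26)]
--     result = [0] * len(array)
--     for i in indexes:
--         val = ord(array[i][key]) - ord('a')
--         cnt[val].append(i)
--     i = 0
--     result_iter = 0
--     while i < len(cnt):
--         while cnt[i]:
--             result[result_iter] = cnt[i].popleft()
--             result_iter += 1
--         if not cnt[i]:
--             i += 1
--     return result
-- ===== SOURCE B (Python) =====
-- def count_sort_by_key(array: list, indexes: list, key: int):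
--     result = [0] * len(array)
--     pos = 0
--     for c in "abcdefghijklmnopqrstuvwxyz":
--         for i in indexes:
--             if array[i][key] == c:
--                 result[pos] = i
--                 pos += 1
--     return result
-- ===== Notes on version B (the rewrite author's own statement) =====
-- stated objective: alternative
-- what changed: Replaces the deque bucket table drained by nested while loops with 26 stable gather passes (one scan of the indexes per letter) that write directly into the preallocated result; Pre_ excludes inputs where some array[i][key] is not a lowercase letter (A then raises IndexError, or for 'G'..'`' returns an order produced by accidental negative-index wraparound into the deque table) and inputs with more indexes than array slots (A raises).
-- outside the precondition, e.g. on count_sort_by_key(['G', 'b'], [0, 1], 0): A returns [0, 1], B returns [1, 0]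
import Mathlib
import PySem

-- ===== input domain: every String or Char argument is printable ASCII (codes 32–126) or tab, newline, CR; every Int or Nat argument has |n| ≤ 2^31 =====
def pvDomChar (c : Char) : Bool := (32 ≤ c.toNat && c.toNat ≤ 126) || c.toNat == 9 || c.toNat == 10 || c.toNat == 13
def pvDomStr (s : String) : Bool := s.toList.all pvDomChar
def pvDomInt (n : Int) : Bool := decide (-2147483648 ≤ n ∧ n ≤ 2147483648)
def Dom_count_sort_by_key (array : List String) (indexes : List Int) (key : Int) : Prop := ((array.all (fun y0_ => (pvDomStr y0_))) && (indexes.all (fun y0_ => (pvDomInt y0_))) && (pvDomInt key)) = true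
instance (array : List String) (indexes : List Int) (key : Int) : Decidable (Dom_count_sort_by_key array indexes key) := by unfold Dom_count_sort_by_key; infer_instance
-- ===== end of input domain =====

-- B replaces A's deque bucket table (filled in one pass, drained by nested while loops)
-- with 26 stable gather passes over the indexes, one per letter, writing directly into
-- the preallocated result; equal output proved on Pre_ (lowercase keys, enough slots).

-- shared subexpression of both Pythons: the character array[i][key];
-- none = IndexError (excluded by Pre_count_sort_by_key).
def pvCharAt (array : List String) (key : Int) (i : Int) : Option Char :=
  (PySem.List.pyGet? array i).bind (fun s => PySem.Str.pyGet? s key)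

-- ===== PORT A =====
-- ord(array[i][key]) - ord('a'); the getD default stands for the excluded IndexError.
def pvRawKey (array : List String) (key : Int) (i : Int) : Int :=
  (((pvCharAt array key i).getD 'a').toNat : Int) - 97

-- Python list indexing cnt[val] on the 26-list wraps a negative in-range val to val+26.
def pvBucketIdxA (array : List String) (key : Int) (i : Int) : Nat :=
  let val := pvRawKey array key i
  (if val < 0 then val + 26 else val).toNat

-- one step of the 'for i in indexes' loop: cnt[val].append(i)
def pvStepA (array : List String) (key : Int) (cnt : List (List Int)) (i : Int) : List (List Int) :=
  let j := pvBucketIdxA array key i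
  cnt.set j (cnt.getD j [] ++ [i])

def pvBucketsA (array : List String) (indexes : List Int) (key : Int) : List (List Int) :=
  indexes.foldl (pvStepA array key) (List.replicate 26 [])

-- the nested while loops: popleft every bucket in order into result
def pvDrainA : List (List Int) → List Int
  | [] => []
  | b :: rest => b ++ pvDrainA rest

def count_sort_by_key (array : List String) (indexes : List Int) (key : Int) : List Int :=
  let flat := pvDrainA (pvBucketsA array indexes key)
  -- result was preallocated as [0]*len(array); unwritten slots stay 0
  flat ++ List.replicate (array.length - flat.length) 0

-- ===== PORT B =====
def pvLowercase : List Char :=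
  ['a','b','c','d','e','f','g','h','i','j','k','l','m','n','o','p','q','r','s','t','u','v','w','x','y','z']

-- result[pos] = i; Python raises when pos is out of range (List.set is then a no-op),
-- which Pre_count_sort_by_key excludes.
def count_sort_by_key_alt (array : List String) (indexes : List Int) (key : Int) : List Int :=
  (pvLowercase.foldl (fun st c =>
      indexes.foldl (fun st i =>
        if ((pvCharAt array key i).getD ' ') == c then (st.1.set st.2 i, st.2 + 1) else st) st)
    (List.replicate array.length 0, 0)).1

-- ===== PRECONDITION & SPEC =====
def pvIsLower (array : List String) (key : Int) (i : Int) : Bool :=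
  (pvCharAt array key i).elim false (fun c => decide (97 ≤ c.toNat ∧ c.toNat ≤ 122))

-- Pre_ excludes inputs where some array[i][key] is not a lowercase letter — A then raises
-- IndexError (codes outside 71..122) or, for codes 71..96, returns an order produced by
-- accidental negative-index wraparound into the deque table — and inputs with more
-- indexes than array slots, on which A raises IndexError while draining.
def Pre_count_sort_by_key (array : List String) (indexes : List Int) (key : Int) : Prop :=
  indexes.length ≤ array.length ∧ ∀ i ∈ indexes, pvIsLower array key i = true
instance (array : List String) (indexes : List Int) (key : Int) : Decidable (Pre_count_sort_by_key array indexes key) := by unfold Pre_count_sort_by_key; infer_instance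

def pvWitness_count_sort_by_key : List String × List Int × Int := (["ba", "ac", "za"], [0, 1, 2], 1)

def Spec_count_sort_by_key (array : List String) (indexes : List Int) (key : Int) (out : List Int) : Prop := out = count_sort_by_key_alt array indexes key
instance (array : List String) (indexes : List Int) (key : Int) (out : List Int) : Decidable (Spec_count_sort_by_key array indexes key out) := by unfold Spec_count_sort_by_key; infer_instance

-- ===== CLAIM (what is proved, stated in full; the proofs are below) =====
def Claim_equal_count_sort_by_key : Prop := ∀ (array : List String) (indexes : List Int) (key : Int), Dom_count_sort_by_key array indexes key → Pre_count_sort_by_key array indexes key → Spec_count_sort_by_key array indexes key (count_sort_by_key array indexes key)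

-- ===== LEMMAS AND PROOFS =====

theorem length_foldl_stepA (array : List String) (key : Int) (l : List Int)
    (cnt : List (List Int)) :
    (l.foldl (pvStepA array key) cnt).length = cnt.length := by
  induction l generalizing cnt with
  | nil => rfl
  | cons x xs ih => rw [List.foldl_cons, ih, pvStepA, List.length_set]

theorem getD_foldl_stepA (array : List String) (key : Int) (l : List Int)
    (cnt : List (List Int)) (hlen : ∀ i ∈ l, pvBucketIdxA array key i < cnt.length)
    (j : Nat) (hj : j < cnt.length) :
    (l.foldl (pvStepA array key) cnt).getD j []
      = cnt.getD j [] ++ l.filter (fun i => pvBucketIdxA array key i == j) := by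
  induction l generalizing cnt with
  | nil => simp
  | cons x xs ih =>
    have hx := hlen x (by simp)
    rw [List.foldl_cons]
    rw [ih (pvStepA array key cnt x)
        (fun i hi => by
          simpa [pvStepA] using hlen i (List.mem_cons_of_mem _ hi))
        (by simpa [pvStepA] using hj)]
    by_cases h : pvBucketIdxA array key x == j
    · have hj' : pvBucketIdxA array key x = j := by simpa using h
      simp [pvStepA, List.getD_eq_getElem?_getD, ← hj',
        List.getElem?_set_self (by omega), List.getElem?_eq_getElem hx]
    · have hj' : pvBucketIdxA array key x ≠ j := by simpa using h
      simp [pvStepA, h, List.getD_eq_getElem?_getD,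
        List.getElem?_set_ne hj']

theorem drainA_eq_flatten (bs : List (List Int)) : pvDrainA bs = bs.flatten := by
  induction bs with
  | nil => rfl
  | cons b rest ih => simp [pvDrainA, ih]

-- under pvIsLower, the char exists and has code 97..122
theorem isLower_charAt (array : List String) (key : Int) (i : Int)
    (h : pvIsLower array key i = true) :
    ∃ c, pvCharAt array key i = some c ∧ 97 ≤ c.toNat ∧ c.toNat ≤ 122 := by
  unfold pvIsLower at h
  cases hc : pvCharAt array key i with
  | none => rw [hc] at h; simp at h
  | some c =>
    rw [hc] at h
    simp only [Option.elim_some, decide_eq_true_eq] at h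
    exact ⟨c, rfl, h.1, h.2⟩

theorem bucketIdx_lt (array : List String) (key : Int) (i : Int)
    (h : pvIsLower array key i = true) : pvBucketIdxA array key i < 26 := by
  obtain ⟨c, hc, h1, h2⟩ := isLower_charAt array key i h
  show (if pvRawKey array key i < 0 then pvRawKey array key i + 26
        else pvRawKey array key i).toNat < 26
  unfold pvRawKey
  rw [hc]
  simp only [Option.getD_some]
  split <;> omega

-- the 26 letters B scans are exactly A's bucket indexes 0..25
theorem lowercase_eq_map_range :
    pvLowercase = (List.range 26).map (fun j => Char.ofNat (97 + j)) := by decide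

-- B's char comparison agrees with A's bucket index under pvIsLower
theorem charEq_eq_idxEq (array : List String) (key : Int) (i : Int)
    (h : pvIsLower array key i = true) (j : Nat) (hj : j < 26) :
    (((pvCharAt array key i).getD ' ') == Char.ofNat (97 + j))
      = (pvBucketIdxA array key i == j) := by
  obtain ⟨c, hc, h1, h2⟩ := isLower_charAt array key i h
  have hidx : pvBucketIdxA array key i
      = (if pvRawKey array key i < 0 then pvRawKey array key i + 26
         else pvRawKey array key i).toNat := rfl
  have hraw : pvRawKey array key i = (c.toNat : Int) - 97 := by
    unfold pvRawKey; rw [hc]; rfl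
  have hvalid : Nat.isValidChar (97 + j) := Or.inl (by omega)
  have htn : (Char.ofNat (97 + j)).toNat = 97 + j := by
    rw [Char.toNat_ofNat, if_pos hvalid]
  rw [hc, Option.getD_some, Bool.eq_iff_iff]
  simp only [beq_iff_eq, hidx, hraw]
  constructor
  · intro he
    have : c.toNat = 97 + j := by rw [he, htn]
    split <;> omega
  · intro he
    have hcn : c.toNat = 97 + j := by split at he <;> omega
    rw [← Char.ofNat_toNat c, hcn]

-- inner gather pass of B: appends the matching indexes at position L.length
theorem fill_inner (q : Int → Bool) (l : List Int) (L : List Int) (k : Nat)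
    (hroom : (l.filter q).length ≤ k) :
    l.foldl (fun st i => if q i then (st.1.set st.2 i, st.2 + 1) else st)
        (L ++ List.replicate k (0 : Int), L.length)
      = (L ++ l.filter q ++ List.replicate (k - (l.filter q).length) 0,
         L.length + (l.filter q).length) := by
  induction l generalizing L k with
  | nil => simp
  | cons x xs ih =>
    rw [List.foldl_cons]
    by_cases hq : q x
    · have hflt : (x :: xs).filter q = x :: xs.filter q := by simp [hq]
      have hk : 1 ≤ k := by rw [hflt] at hroom; simp at hroom; omega
      have hrep : List.replicate k (0 : Int) = 0 :: List.replicate (k - 1) 0 := by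
        cases k with
        | zero => omega
        | succ m => simp [List.replicate_succ]
      have hset : (L ++ List.replicate k (0 : Int)).set L.length x
          = (L ++ [x]) ++ List.replicate (k - 1) 0 := by
        rw [hrep, List.set_append_right _ _ (le_refl _)]
        simp
      simp only [hq, if_pos]
      rw [hset, hflt]
      have hr' : (xs.filter q).length ≤ k - 1 := by
        rw [hflt] at hroom; simp only [List.length_cons] at hroom; omega
      have h2 := ih (L ++ [x]) (k - 1) hr'
      simp only [List.length_append, List.length_cons, List.length_nil,
        List.append_assoc, List.cons_append, List.nil_append] at h2 ⊢
      rw [show k - ((xs.filter q).length + 1) = k - 1 - (xs.filter q).length by omega,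
        show L.length + ((xs.filter q).length + 1) = L.length + 1 + (xs.filter q).length by omega]
      exact h2
    · simp only [hq, Bool.false_eq_true, if_false]
      rw [ih L k (by simpa [List.filter_cons, hq] using hroom)]
      simp [hq]

-- outer loop of B over a list of letters
theorem fill_outer (array : List String) (key : Int) (indexes : List Int)
    (cs : List Char) (L : List Int) (k : Nat)
    (hroom : (cs.flatMap (fun c => indexes.filter
        (fun i => ((pvCharAt array key i).getD ' ') == c))).length ≤ k) :
    cs.foldl (fun st c =>
        indexes.foldl (fun st i =>
          if ((pvCharAt array key i).getD ' ') == c then (st.1.set st.2 i, st.2 + 1)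
          else st) st)
      (L ++ List.replicate k (0 : Int), L.length)
      = (L ++ (cs.flatMap (fun c => indexes.filter
            (fun i => ((pvCharAt array key i).getD ' ') == c)))
          ++ List.replicate (k - (cs.flatMap (fun c => indexes.filter
            (fun i => ((pvCharAt array key i).getD ' ') == c))).length) 0,
         L.length + (cs.flatMap (fun c => indexes.filter
            (fun i => ((pvCharAt array key i).getD ' ') == c))).length) := by
  induction cs generalizing L k with
  | nil => simp
  | cons c cs ih =>
    rw [List.foldl_cons]
    rw [List.flatMap_cons] at hroom ⊢
    have hfc : (indexes.filter (fun i => ((pvCharAt array key i).getD ' ') == c)).length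
        ≤ k := by
      rw [List.length_append] at hroom; omega
    rw [fill_inner _ indexes L k hfc]
    have hr' : (cs.flatMap (fun c => indexes.filter
        (fun i => ((pvCharAt array key i).getD ' ') == c))).length
        ≤ k - (indexes.filter (fun i => ((pvCharAt array key i).getD ' ') == c)).length := by
      rw [List.length_append] at hroom; omega
    have h2 := ih (L ++ indexes.filter (fun i => ((pvCharAt array key i).getD ' ') == c))
      (k - (indexes.filter (fun i => ((pvCharAt array key i).getD ' ') == c)).length) hr'
    simp only [List.length_append, List.append_assoc] at h2 ⊢
    rw [List.length_append] at hroom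
    rw [show k - ((indexes.filter (fun i => ((pvCharAt array key i).getD ' ') == c)).length
          + (cs.flatMap (fun c => indexes.filter
              (fun i => ((pvCharAt array key i).getD ' ') == c))).length)
        = k - (indexes.filter (fun i => ((pvCharAt array key i).getD ' ') == c)).length
          - (cs.flatMap (fun c => indexes.filter
              (fun i => ((pvCharAt array key i).getD ' ') == c))).length by omega,
      show L.length + ((indexes.filter (fun i => ((pvCharAt array key i).getD ' ') == c)).length
          + (cs.flatMap (fun c => indexes.filter
              (fun i => ((pvCharAt array key i).getD ' ') == c))).length)
        = L.length + (indexes.filter (fun i => ((pvCharAt array key i).getD ' ') == c)).length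
          + (cs.flatMap (fun c => indexes.filter
              (fun i => ((pvCharAt array key i).getD ' ') == c))).length by omega]
    exact h2

-- each index lands in at most one letter bucket, so the gathered list is no longer than indexes
theorem length_flatMap_filter_le (g : Int → Char) (cs : List Char) (l : List Int)
    (hnd : cs.Nodup) :
    (cs.flatMap (fun c => l.filter (fun i => g i == c))).length ≤ l.length := by
  induction cs generalizing l with
  | nil => simp
  | cons c cs ih =>
    have hnotmem : c ∉ cs := (List.nodup_cons.mp hnd).1
    rw [List.flatMap_cons, List.length_append]
    have hsub : ∀ c' ∈ cs, l.filter (fun i => g i == c')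
        = (l.filter (fun i => !(g i == c))).filter (fun i => g i == c') := by
      intro c' hc'
      rw [List.filter_filter]
      apply List.filter_congr
      intro i _
      by_cases h : (g i == c') = true
      · have hne : (g i == c) = false := by
          simp only [beq_iff_eq] at h ⊢
          simp only [beq_eq_false_iff_ne, ne_eq]
          intro hh
          exact hnotmem (hh ▸ h ▸ hc')
        simp [h, hne]
      · simp [h]
    have hmap : cs.flatMap (fun c' => l.filter (fun i => g i == c'))
        = cs.flatMap (fun c' => (l.filter (fun i => !(g i == c))).filter
            (fun i => g i == c')) := by
      rw [List.flatMap_def, List.flatMap_def, List.map_congr_left hsub]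
    rw [hmap]
    have hrec := ih (l.filter (fun i => !(g i == c))) (List.Nodup.of_cons hnd)
    have hpart : l.length = (l.filter (fun i => g i == c)).length
        + (l.filter (fun i => !(g i == c))).length := by
      simpa using List.length_eq_length_filter_add (l := l) (fun i => g i == c)
    omega

-- ===== VERDICT (by name: the statement is the Claim_ definition above) =====
theorem count_sort_by_key_spec : Claim_equal_count_sort_by_key := by
  intro array indexes key _hdom hpre
  obtain ⟨hlen, hlow⟩ := hpre
  unfold Spec_count_sort_by_key count_sort_by_key count_sort_by_key_alt
  have hnd : pvLowercase.Nodup := by decide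
  have hle : (pvLowercase.flatMap (fun c => indexes.filter
      (fun i => ((pvCharAt array key i).getD ' ') == c))).length ≤ indexes.length :=
    length_flatMap_filter_le (fun i => (pvCharAt array key i).getD ' ') pvLowercase indexes hnd
  have hroom : (pvLowercase.flatMap (fun c => indexes.filter
      (fun i => ((pvCharAt array key i).getD ' ') == c))).length ≤ array.length :=
    le_trans hle hlen
  have hB := fill_outer array key indexes pvLowercase [] array.length hroom
  simp only [List.nil_append, List.length_nil] at hB
  rw [congrArg Prod.fst hB]
  -- both sides are now <flat> ++ zero padding; identify the flats
  have hbuckets : pvBucketsA array indexes key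
      = (List.range 26).map (fun j => indexes.filter (fun i => pvBucketIdxA array key i == j)) := by
    have hlen26 : (pvBucketsA array indexes key).length = 26 := by
      rw [pvBucketsA, length_foldl_stepA]; rfl
    apply List.ext_getElem
    · simp [hlen26]
    · intro k h1 h2
      have hk : k < 26 := by simpa using h2
      have hget := getD_foldl_stepA array key indexes (List.replicate 26 [])
        (fun i hi => by simpa using bucketIdx_lt array key i (hlow i hi)) k (by simpa using hk)
      rw [← List.getD_eq_getElem _ [] h1]
      have hrep : (List.replicate 26 ([] : List Int)).getD k [] = [] := by
        rw [List.getD_eq_getElem _ [] (by simpa using hk), List.getElem_replicate]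
      unfold pvBucketsA
      rw [hget, hrep]
      simp
  have hflat : pvLowercase.flatMap (fun c => indexes.filter
      (fun i => ((pvCharAt array key i).getD ' ') == c))
      = pvDrainA (pvBucketsA array indexes key) := by
    rw [drainA_eq_flatten, hbuckets, lowercase_eq_map_range, List.flatMap_def,
      List.map_map]
    congr 1
    apply List.map_congr_left
    intro j hj
    have hj26 : j < 26 := List.mem_range.mp hj
    apply List.filter_congr
    intro i hi
    exact charEq_eq_idxEq array key i (hlow i hi) j hj26
  rw [hflat]
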